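-- pv_equiv track=rewrite | github.com/simon-rechermann/py_pdf2rmnotebook | pdf2rmnotebook.py | _get_page_uuids_and_values
-- ===== SOURCE A (Python) =====
-- def _get_page_uuids_and_values(page_uuids):
--     # After 'bz' we continue with 'ca'
--     page_uuids_and_values = []
--     for idx, page_uuid in enumerate(page_uuids):
--         # Calculate the first letter
--         first_letter_idx = idx // 26  # Dividing by 26 to shift to the next letter after 26 entries
--         second_letter_idx = idx % 26  # Remainder will give the second letter index
--
--         # Convert index to lowercase letters, first_letter starting from 'b' (98 in ASCII)
--         first_letter = chr(98 + first_letter_idx)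
--         second_letter = chr(97 + second_letter_idx)
--
--         page_uuids_and_values.append(
--             {"uuid": str(page_uuid), "value": f"{first_letter}{second_letter}"}
--         )
--     return page_uuids_and_values
-- ===== SOURCE B (Python) =====
-- def _get_page_uuids_and_values(page_uuids):
--     # Odometer: carry the two-letter label as running state instead of
--     # recomputing it from the index each iteration.
--     result = []
--     first_letter = "b"
--     second_letter = "a"
--     for page_uuid in page_uuids:
--         result.append({"uuid": str(page_uuid), "value": first_letter + second_letter})
--         second_letter = chr(ord(second_letter) + 1)
--         if second_letter > "z":
--             second_letter = "a"
--             first_letter = chr(ord(first_letter) + 1)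
--     return result
-- ===== Notes on version B (the rewrite author's own statement) =====
-- stated objective: alternative
-- what changed: Replaces the per-index //26 and %26 arithmetic with an odometer that carries the two-letter label as running state (increment the second letter, carry into the first on overflow past 'z').
import Mathlib
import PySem

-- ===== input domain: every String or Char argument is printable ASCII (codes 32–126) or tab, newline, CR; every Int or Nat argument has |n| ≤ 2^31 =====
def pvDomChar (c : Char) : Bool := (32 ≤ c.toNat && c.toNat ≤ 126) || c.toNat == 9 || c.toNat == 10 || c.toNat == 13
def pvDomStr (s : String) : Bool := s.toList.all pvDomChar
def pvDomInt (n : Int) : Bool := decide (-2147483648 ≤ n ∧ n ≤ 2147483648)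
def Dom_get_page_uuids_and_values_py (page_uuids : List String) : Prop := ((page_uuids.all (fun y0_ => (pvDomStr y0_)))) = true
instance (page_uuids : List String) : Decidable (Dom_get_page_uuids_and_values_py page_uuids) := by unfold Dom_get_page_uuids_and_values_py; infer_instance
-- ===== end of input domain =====

-- B replaces A's per-index //26 and %26 arithmetic with an odometer carrying the
-- label as running state (alternative decomposition; return value only, no speed claim).

-- ===== PORT A =====
-- the append-loop over enumerate(page_uuids) builds one entry per element: a map.
-- chr(98 + k) is ported as Char.ofNat on the nonnegative code (exact for the codes produced here).
def get_page_uuids_and_values_py (page_uuids : List String) : List (List (String × String)) :=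
  (PySem.List.enumerate page_uuids).map (fun p =>
    [("uuid", p.2),
     ("value", String.mk [Char.ofNat (98 + PySem.Int.floordiv p.1 26).toNat,
                          Char.ofNat (97 + PySem.Int.mod p.1 26).toNat])])

-- ===== PORT B =====
-- odometer loop of Source B; the two letters are carried as their character codes
-- (ord values), so chr(ord(c)+1) is code+1 and the comparison second_letter > 'z'
-- is code > 122 (exact: Python compares one-char strings by codepoint).
def pv_bLoop (f s : Nat) : List String → List (List (String × String))
  | [] => []
  | u :: rest =>
    [("uuid", u), ("value", String.mk [Char.ofNat f, Char.ofNat s])] ::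
      (if s + 1 > 122 then pv_bLoop (f + 1) 97 rest else pv_bLoop f (s + 1) rest)

def get_page_uuids_and_values_py_alt (page_uuids : List String) : List (List (String × String)) :=
  pv_bLoop 98 97 page_uuids

-- ===== PRECONDITION & SPEC =====
def Spec_get_page_uuids_and_values_py (page_uuids : List String) (out : List (List (String × String))) : Prop := out = get_page_uuids_and_values_py_alt page_uuids
instance (page_uuids : List String) (out : List (List (String × String))) : Decidable (Spec_get_page_uuids_and_values_py page_uuids out) := by unfold Spec_get_page_uuids_and_values_py; infer_instance

-- ===== CLAIM (what is proved, stated in full; the proofs are below) =====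
def Claim_equal_get_page_uuids_and_values_py : Prop := ∀ (page_uuids : List String), Dom_get_page_uuids_and_values_py page_uuids → Spec_get_page_uuids_and_values_py page_uuids (get_page_uuids_and_values_py page_uuids)

-- ===== LEMMAS AND PROOFS =====

lemma pv_bLoop_eq (xs : List String) : ∀ (n : Nat),
    pv_bLoop (98 + n / 26) (97 + n % 26) xs =
      (PySem.List.enumerate xs (n : Int)).map (fun p =>
        [("uuid", p.2),
         ("value", String.mk [Char.ofNat (98 + PySem.Int.floordiv p.1 26).toNat,
                              Char.ofNat (97 + PySem.Int.mod p.1 26).toNat])]) := by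
  induction xs with
  | nil => intro n; simp [pv_bLoop, PySem.List.enumerate_nil]
  | cons u rest ih =>
    intro n
    rw [PySem.List.enumerate_cons, List.map_cons, pv_bLoop]
    have hd : PySem.Int.floordiv (n : Int) 26 = ((n / 26 : Nat) : Int) := by
      exact_mod_cast PySem.Int.floordiv_natCast n 26
    have hm : PySem.Int.mod (n : Int) 26 = ((n % 26 : Nat) : Int) := by
      exact_mod_cast PySem.Int.mod_natCast n 26
    congr 1
    · simp
      congr 2 <;> omega
    · by_cases h : n % 26 = 25
      · have h1 : 97 + n % 26 + 1 > 122 := by omega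
        rw [if_pos h1]
        have h2 : 98 + n / 26 + 1 = 98 + (n + 1) / 26 := by omega
        have h3 : (97 : Nat) = 97 + (n + 1) % 26 := by omega
        rw [h2, h3, ih (n + 1)]
        norm_num
      · have h1 : ¬ (97 + n % 26 + 1 > 122) := by omega
        rw [if_neg h1]
        have h2 : 98 + n / 26 = 98 + (n + 1) / 26 := by omega
        have h3 : 97 + n % 26 + 1 = 97 + (n + 1) % 26 := by omega
        rw [h2, h3, ih (n + 1)]
        norm_num

-- ===== VERDICT (by name: the statement is the Claim_ definition above) =====
theorem get_page_uuids_and_values_py_spec : Claim_equal_get_page_uuids_and_values_py := by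
  intro xs _
  unfold Spec_get_page_uuids_and_values_py get_page_uuids_and_values_py get_page_uuids_and_values_py_alt
  have := pv_bLoop_eq xs 0
  simpa using this.symm
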